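-- pv_equiv track=rewrite | github.com/Edv1nas/Lesson11 | excercise_one.py | add_list_items
-- ===== SOURCE A (Python) =====
-- from typing import List
--
-- def add_list_items(list1: List[int], list2: List[int]) ->List[int]:
--     list3=[]
--
--     for i in range(0,len(list1)):
--         list3.append(list1[i] + list2[i])
--     if len(set(list3)) == 1:
--         return True
--     else:
--         return False
-- ===== SOURCE B (Python) =====
-- def add_list_items(list1, list2):
--     if not list1:
--         return False
--     target = list1[0] + list2[0]
--     for i in range(1, len(list1)):
--         if list1[i] + list2[i] != target:
--             return False
--     return True
-- ===== Notes on version B (the rewrite author's own statement) =====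
-- stated objective: faster
-- what changed: Instead of materialising a list of all sums and deduplicating it with set() to test len==1, B keeps one scalar target (the first sum) in a single fused indexed pass and returns False as soon as a later sum differs (or when list1 is empty); no intermediate list or set is built.
import Mathlib
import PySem

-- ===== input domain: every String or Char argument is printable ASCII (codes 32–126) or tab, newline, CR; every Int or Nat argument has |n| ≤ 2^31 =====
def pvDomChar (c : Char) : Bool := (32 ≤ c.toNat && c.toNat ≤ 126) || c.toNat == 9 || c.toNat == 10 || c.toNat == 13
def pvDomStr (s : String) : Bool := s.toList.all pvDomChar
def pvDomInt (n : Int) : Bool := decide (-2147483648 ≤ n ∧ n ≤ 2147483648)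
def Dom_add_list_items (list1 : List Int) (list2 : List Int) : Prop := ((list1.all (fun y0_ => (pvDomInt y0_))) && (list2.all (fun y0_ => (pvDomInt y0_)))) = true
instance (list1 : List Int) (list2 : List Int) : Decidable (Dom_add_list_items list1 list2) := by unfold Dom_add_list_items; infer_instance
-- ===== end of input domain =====

-- B replaces A's build-a-list-then-set() uniqueness test by a single fused indexed pass that
-- keeps one scalar target (the first sum) and fails fast; objective: simpler, O(1) extra space.

-- ===== PORT A =====
-- list3 = []; for i in range(0, len(list1)): list3.append(list1[i] + list2[i]);
-- return len(set(list3)) == 1    (pyGetD is exact under Pre_, which puts every index in range)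
def add_list_items (list1 : List Int) (list2 : List Int) : Bool :=
  let list3 := (PySem.List.pyRange 0 (list1.length : Int) 1).foldl
    (fun acc i => acc ++ [PySem.List.pyGetD list1 i 0 + PySem.List.pyGetD list2 i 0]) []
  if (PySem.Set.ofList list3).length = 1 then true else false

-- ===== PORT B =====
-- the loop 'for i in range(1, len(list1)): if list1[i] + list2[i] != target: return False'
def altCheck (list1 : List Int) (list2 : List Int) (target : Int) : List Int → Bool
  | [] => true
  | i :: rest =>
      if PySem.List.pyGetD list1 i 0 + PySem.List.pyGetD list2 i 0 ≠ target then false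
      else altCheck list1 list2 target rest

def add_list_items_alt (list1 : List Int) (list2 : List Int) : Bool :=
  if list1.isEmpty then false
  else
    let target := PySem.List.pyGetD list1 0 0 + PySem.List.pyGetD list2 0 0
    altCheck list1 list2 target (PySem.List.pyRange 1 (list1.length : Int) 1)

-- ===== PRECONDITION & SPEC =====
-- A raises IndexError on list2[i] whenever list2 is shorter than list1; exactly those inputs are excluded.
def Pre_add_list_items (list1 : List Int) (list2 : List Int) : Prop :=
  list1.length ≤ list2.length
instance (list1 : List Int) (list2 : List Int) : Decidable (Pre_add_list_items list1 list2) := by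
  unfold Pre_add_list_items; infer_instance

def pvWitness_add_list_items : List Int × List Int := ([1, 2], [3, 2])

def Spec_add_list_items (list1 : List Int) (list2 : List Int) (out : Bool) : Prop := out = add_list_items_alt list1 list2
instance (list1 : List Int) (list2 : List Int) (out : Bool) : Decidable (Spec_add_list_items list1 list2 out) := by unfold Spec_add_list_items; infer_instance

-- ===== CLAIM (what is proved, stated in full; the proofs are below) =====
def Claim_equal_add_list_items : Prop := ∀ (list1 : List Int) (list2 : List Int), Dom_add_list_items list1 list2 → Pre_add_list_items list1 list2 → Spec_add_list_items list1 list2 (add_list_items list1 list2)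

-- ===== LEMMAS AND PROOFS =====

-- B's loop tests that every indexed sum equals the target
theorem altCheck_eq_all (list1 list2 : List Int) (t : Int) (r : List Int) :
    altCheck list1 list2 t r =
      r.all (fun i => PySem.List.pyGetD list1 i 0 + PySem.List.pyGetD list2 i 0 == t) := by
  induction r with
  | nil => rfl
  | cons i rest ih =>
      simp only [altCheck, List.all_cons, ih]
      by_cases h : PySem.List.pyGetD list1 i 0 + PySem.List.pyGetD list2 i 0 = t <;> simp [h]

-- a deduplicated list has exactly one element iff the source is nonempty with all elements equal
theorem ofList_singleton_of_all_eq (a : Int) (xs : List Int)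
    (h : ∀ x ∈ xs, x = a) : PySem.Set.ofList (a :: xs) = [a] := by
  induction xs with
  | nil => rfl
  | cons b ys ih =>
      have hb : b = a := h b (by simp)
      subst hb
      have := ih (fun x hx => h x (by simp [hx]))
      calc PySem.Set.ofList (b :: b :: ys) = PySem.Set.ofList (b :: ys) := by
            simp [PySem.Set.ofList_cons, PySem.Set.discard]
        _ = [b] := this

theorem setLen_one_iff (a : Int) (xs : List Int) :
    (PySem.Set.ofList (a :: xs)).length = 1 ↔ ∀ x ∈ xs, x = a := by
  constructor
  · intro h
    rcases List.length_eq_one_iff.mp h with ⟨c, hc⟩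
    have hamem : a ∈ PySem.Set.ofList (a :: xs) := by
      rw [PySem.Set.mem_ofList]; simp
    rw [hc] at hamem
    have hac : a = c := by simpa using hamem
    intro x hx
    have : x ∈ PySem.Set.ofList (a :: xs) := by
      rw [PySem.Set.mem_ofList]; simp [hx]
    rw [hc] at this
    simp at this
    omega
  · intro h
    rw [ofList_singleton_of_all_eq a xs h]
    rfl

-- ===== VERDICT (by name: the statement is the Claim_ definition above) =====
theorem add_list_items_spec : Claim_equal_add_list_items := by
  intro list1 list2 _ _
  unfold Spec_add_list_items add_list_items add_list_items_alt
  rw [PySem.List.foldl_append_singleton_eq_map]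
  cases list1 with
  | nil => simp [PySem.Set.ofList_nil]
  | cons a l =>
      set f : Int → Int := fun i => PySem.List.pyGetD (a :: l) i 0 + PySem.List.pyGetD list2 i 0 with hf
      have hn : (0 : Int) < ((a :: l).length : Int) := by
        simp
      rw [PySem.List.pyRange_one_cons hn]
      simp only [List.nil_append, List.map_cons, List.isEmpty_cons, Bool.false_eq_true,
        if_false]
      rw [altCheck_eq_all, show ((0:Int)+1) = (1:Int) by norm_num]
      by_cases h : ∀ x ∈ (PySem.List.pyRange 1 ((a :: l).length : Int) 1).map f, x = f 0
      · rw [if_pos ((setLen_one_iff (f 0) _).mpr h)]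
        symm
        rw [List.all_eq_true]
        intro i hi
        have : f i = f 0 := h (f i) (List.mem_map_of_mem hi)
        simpa [hf] using this
      · rw [if_neg (fun hc => h ((setLen_one_iff (f 0) _).mp hc))]
        symm
        rw [Bool.eq_false_iff]
        intro hall
        apply h
        intro x hx
        rcases List.mem_map.mp hx with ⟨i, hi, rfl⟩
        have := (List.all_eq_true.mp hall) i hi
        simpa [hf] using this
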